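-- pv_equiv track=rewrite | github.com/CsomagoltWifi/emelt-info-txt-sql-konverter | erettsegi_txt_sql_converter.py | int_resolve
-- ===== SOURCE A (Python) =====
-- def int_resolve(int, neg):
--     int = abs(int)
--     if neg:
--         return "boolean"
--     value = {1:"boolean", 127: "tinyint", 32767: "smallint", 8388607: "mediumint", 2147483647: "int"}
--     for idx, i in enumerate(value):
--         if int <= i:
--             return list(value.values())[idx]
-- ===== SOURCE B (Python) =====
-- def int_resolve(int, neg):
--     if neg:
--         return "boolean"
--     value = abs(int)
--     thresholds = [1, 127, 32767, 8388607, 2147483647]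
--     names = ["boolean", "tinyint", "smallint", "mediumint", "int"]
--     lo, hi = 0, len(thresholds)
--     while lo < hi:
--         mid = (lo + hi) // 2
--         if thresholds[mid] < value:
--             lo = mid + 1
--         else:
--             hi = mid
--     return names[lo] if lo < len(names) else None
-- ===== Notes on version B (the rewrite author's own statement) =====
-- stated objective: alternative
-- what changed: Replaces A's linear scan over the dict's keys (with a per-hit rebuild of list(value.values())) by a hand-written bisect_left binary search over a threshold list, indexing a parallel name list.
import Mathlib
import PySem

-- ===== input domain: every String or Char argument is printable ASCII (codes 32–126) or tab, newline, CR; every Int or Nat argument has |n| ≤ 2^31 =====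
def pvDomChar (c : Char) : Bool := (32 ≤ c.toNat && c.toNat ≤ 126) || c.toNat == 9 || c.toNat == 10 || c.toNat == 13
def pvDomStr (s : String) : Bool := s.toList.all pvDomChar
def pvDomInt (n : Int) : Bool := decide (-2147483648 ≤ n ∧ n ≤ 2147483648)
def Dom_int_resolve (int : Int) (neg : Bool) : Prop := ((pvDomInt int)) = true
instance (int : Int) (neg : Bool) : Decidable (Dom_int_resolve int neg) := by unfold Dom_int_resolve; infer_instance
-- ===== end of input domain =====

-- B replaces A's linear scan over the dict's keys by a hand-written bisect_left
-- binary search over a threshold list ("alternative": different traversal, same results).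
-- ===== PORT A =====
-- A's for-loop over enumerate(value) with early return; vals.getD idx "" ports
-- list(value.values())[idx], exact since idx is always within the 5-element list.
def intResolveLoopA (a : Int) (vals : List String) : List Int → Nat → Option String
  | [], _ => none
  | k :: rest, idx => if a ≤ k then some (vals.getD idx "") else intResolveLoopA a vals rest (idx + 1)

def int_resolve (int : Int) (neg : Bool) : Option String :=
  let a := |int|                  -- int = abs(int)
  if neg then some "boolean"
  else intResolveLoopA a ["boolean", "tinyint", "smallint", "mediumint", "int"]
         [1, 127, 32767, 8388607, 2147483647] 0

-- ===== PORT B =====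
-- B's while lo < hi binary search; ts.getD mid 0 ports thresholds[mid], exact since
-- mid is always within the list.
def bisectLoop (ts : List Int) (v : Int) (lo hi : Nat) : Nat :=
  if _h : lo < hi then
    let mid := (lo + hi) / 2
    if ts.getD mid 0 < v then bisectLoop ts v (mid + 1) hi else bisectLoop ts v lo mid
  else lo
termination_by hi - lo
decreasing_by all_goals omega

def int_resolve_alt (int : Int) (neg : Bool) : Option String :=
  if neg then some "boolean"
  else
    let v := |int|
    let thresholds : List Int := [1, 127, 32767, 8388607, 2147483647]
    let names : List String := ["boolean", "tinyint", "smallint", "mediumint", "int"]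
    let lo := bisectLoop thresholds v 0 thresholds.length
    names[lo]?                    -- names[lo] if lo < len(names) else None

-- ===== PRECONDITION & SPEC =====
def Spec_int_resolve (int : Int) (neg : Bool) (out : Option String) : Prop := out = int_resolve_alt int neg
instance (int : Int) (neg : Bool) (out : Option String) : Decidable (Spec_int_resolve int neg out) := by unfold Spec_int_resolve; infer_instance

-- ===== CLAIM (what is proved, stated in full; the proofs are below) =====
def Claim_equal_int_resolve : Prop := ∀ (int : Int) (neg : Bool), Dom_int_resolve int neg → Spec_int_resolve int neg (int_resolve int neg)

-- ===== LEMMAS AND PROOFS =====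

-- ===== VERDICT (by name: the statement is the Claim_ definition above) =====
theorem bisect_eval (v : Int) :
    bisectLoop [1, 127, 32767, 8388607, 2147483647] v 0 5 =
      if v ≤ 1 then 0 else if v ≤ 127 then 1 else if v ≤ 32767 then 2
      else if v ≤ 8388607 then 3 else if v ≤ 2147483647 then 4 else 5 := by
  split_ifs with h1 h2 h3 h4 h5
  · rw [bisectLoop]; norm_num [List.getD]
    rw [if_neg (by omega)]
    rw [bisectLoop]; norm_num [List.getD]
    rw [if_neg (by omega)]
    rw [bisectLoop]; norm_num [List.getD]
    rw [if_neg (by omega)]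
    rw [bisectLoop]; norm_num
  · rw [bisectLoop]; norm_num [List.getD]
    rw [if_neg (by omega)]
    rw [bisectLoop]; norm_num [List.getD]
    rw [if_neg (by omega)]
    rw [bisectLoop]; norm_num [List.getD]
    rw [if_pos (by omega)]
    rw [bisectLoop]; norm_num
  · rw [bisectLoop]; norm_num [List.getD]
    rw [if_neg (by omega)]
    rw [bisectLoop]; norm_num [List.getD]
    rw [if_pos (by omega)]
    rw [bisectLoop]; norm_num
  · rw [bisectLoop]; norm_num [List.getD]
    rw [if_pos (by omega)]
    rw [bisectLoop]; norm_num [List.getD]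
    rw [if_neg (by omega)]
    rw [bisectLoop]; norm_num [List.getD]
    rw [if_neg (by omega)]
    rw [bisectLoop]; norm_num
  · rw [bisectLoop]; norm_num [List.getD]
    rw [if_pos (by omega)]
    rw [bisectLoop]; norm_num [List.getD]
    rw [if_neg (by omega)]
    rw [bisectLoop]; norm_num [List.getD]
    rw [if_pos (by omega)]
    rw [bisectLoop]; norm_num
  · rw [bisectLoop]; norm_num [List.getD]
    rw [if_pos (by omega)]
    rw [bisectLoop]; norm_num [List.getD]
    rw [if_pos (by omega)]
    rw [bisectLoop]; norm_num

theorem int_resolve_spec : Claim_equal_int_resolve := by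
  intro int neg _
  unfold Spec_int_resolve int_resolve int_resolve_alt
  cases neg with
  | true => simp
  | false =>
    simp only [if_neg Bool.false_ne_true, List.length_cons, List.length_nil]
    rw [bisect_eval]
    simp only [intResolveLoopA]
    split_ifs <;> simp_all
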